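-- pv_equiv track=rewrite | github.com/upskyy/Baekjoon-Online-Judge | Implementation/(1790)수 이어 쓰기 2.py | calculate
-- ===== SOURCE A (Python) =====
-- def calculate(num):
--     lengths = 0
--     for i in range(len(str(num))):
--         if i == 0:
--             start = 1
--         else:
--             start = 10 ** i
--         end = 10 * start - 1
--         if end > num:
--             end = num
--
--         lengths += ((end - start) + 1) * (i + 1)
--
--     return lengths
-- ===== SOURCE B (Python) =====
-- def calculate(num):
--     d = len(str(num))
--     return (num + 1) * d - (10 ** d - 1) // 9
-- ===== Notes on version B (the rewrite author's own statement) =====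
-- stated objective: simpler
-- what changed: Replaces the per-digit-group loop with a single closed-form expression (num+1)*d - (10^d-1)//9 where d = len(str(num)).
-- outside the precondition, e.g. on calculate(-5): A returns -33, B returns -19
import Mathlib
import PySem

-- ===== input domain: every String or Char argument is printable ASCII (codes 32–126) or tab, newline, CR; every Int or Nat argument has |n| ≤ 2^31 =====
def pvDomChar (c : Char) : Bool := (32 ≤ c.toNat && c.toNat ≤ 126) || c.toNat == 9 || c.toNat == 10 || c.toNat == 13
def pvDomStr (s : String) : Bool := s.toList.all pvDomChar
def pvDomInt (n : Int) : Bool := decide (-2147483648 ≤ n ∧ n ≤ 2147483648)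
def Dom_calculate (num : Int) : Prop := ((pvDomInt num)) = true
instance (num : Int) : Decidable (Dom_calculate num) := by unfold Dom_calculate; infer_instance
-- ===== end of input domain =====

-- B replaces A's per-digit-group loop by the closed form (num+1)*d - (10^d-1)//9, d = len(str(num)): simpler, no loop.

set_option maxHeartbeats 1000000


-- ===== PORT A =====
-- 10 ** i is ported as 10 ^ i.toNat, exact since i comes from range(...) so 0 ≤ i.
def calculate (num : Int) : Int :=
  (PySem.List.pyRange 0 (PySem.Str.len (PySem.Int.toStr num)) 1).foldl
    (fun lengths i =>
      let start : Int := if i == 0 then 1 else 10 ^ i.toNat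
      let e0 : Int := 10 * start - 1
      let e : Int := if e0 > num then num else e0
      lengths + ((e - start) + 1) * (i + 1)) 0

-- ===== PORT B =====
-- 10 ** d is ported as 10 ^ d.toNat, exact since d = len(str(num)) ≥ 0.
def calculate_alt (num : Int) : Int :=
  let d : Int := PySem.Str.len (PySem.Int.toStr num)
  (num + 1) * d - PySem.Int.floordiv (10 ^ d.toNat - 1) 9

-- ===== PRECONDITION & SPEC =====
-- Pre_ restricts to the function's natural domain (counts of digits of 1..num): on negative num,
-- A returns an accidental negative accumulation (e.g. A(-5) = -33) that no caller would specify,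
-- while B's closed form returns a different value there (B(-5) = -19).
def Pre_calculate (num : Int) : Prop := 0 ≤ num
instance (num : Int) : Decidable (Pre_calculate num) := by unfold Pre_calculate; infer_instance
def pvWitness_calculate : Int := (42)
def Spec_calculate (num : Int) (out : Int) : Prop := out = calculate_alt num
instance (num : Int) (out : Int) : Decidable (Spec_calculate num out) := by unfold Spec_calculate; infer_instance

-- ===== CLAIM (what is proved, stated in full; the proofs are below) =====
def Claim_equal_calculate : Prop := ∀ (num : Int), Dom_calculate num → Pre_calculate num → Spec_calculate num (calculate num)

-- ===== LEMMAS AND PROOFS =====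

lemma core_len (f : ℕ) : ∀ n : ℕ, n < f → (Nat.toDigitsCore 10 f n []).length = Nat.log 10 n + 1 := by
  induction f with
  | zero => intro n h; omega
  | succ f ih =>
    intro n h
    simp only [Nat.toDigitsCore]
    by_cases h10 : n / 10 = 0
    · have hlt : n < 10 := Nat.lt_of_div_eq_zero (by norm_num) h10
      simp [h10, Nat.log_eq_zero_iff.mpr (Or.inl hlt)]
    · simp only [h10, if_false]
      rw [Nat.toDigitsCore_lens_eq]
      have hn10 : 10 ≤ n := by omega
      rw [ih (n/10) (by omega)]
      have := Nat.log_div_base 10 n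
      have hpos : 0 < Nat.log 10 n := Nat.log_pos (by norm_num) hn10
      omega

lemma len_toStr (n : Int) (hn : 0 ≤ n) :
    PySem.Str.len (PySem.Int.toStr n) = (Nat.log 10 n.toNat : Int) + 1 := by
  rw [PySem.Str.len_eq, PySem.Int.toList_toStr]
  simp only [PySem.Int.toChars, if_neg (by omega : ¬ n < 0)]
  rw [Nat.toDigits, core_len (n.toNat + 1) n.toNat (by omega)]
  push_cast; ring

-- ===== VERDICT (by name: the statement is the Claim_ definition above) =====
theorem calculate_spec : Claim_equal_calculate := by
  intro num hD hP
  unfold Dom_calculate pvDomInt at hD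
  unfold Pre_calculate at hP
  simp only [decide_eq_true_eq] at hD
  unfold Spec_calculate
  have hlen := len_toStr num hP
  have htn : (num.toNat : Int) = num := Int.toNat_of_nonneg hP
  have hup : num < (10 : Int) ^ (Nat.log 10 num.toNat + 1) := by
    have h := Nat.lt_pow_succ_log_self (by norm_num : 1 < 10) num.toNat
    have h2 : (num.toNat : Int) < ((10 ^ (Nat.log 10 num.toNat + 1) : ℕ) : Int) := by
      exact_mod_cast h
    rw [htn] at h2; push_cast at h2; exact h2
  have hlow : (10 : Int) ^ (Nat.log 10 num.toNat) ≤ num ∨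
      (num = 0 ∧ Nat.log 10 num.toNat = 0) := by
    by_cases h0 : num = 0
    · right; exact ⟨h0, by simp [h0]⟩
    · left
      have h := Nat.pow_log_le_self 10 (x := num.toNat) (by omega)
      have h2 : ((10 ^ (Nat.log 10 num.toNat) : ℕ) : Int) ≤ (num.toNat : Int) := by
        exact_mod_cast h
      rw [htn] at h2; push_cast at h2; exact h2
  have hlog : Nat.log 10 num.toNat ≤ 9 := by
    by_cases h0 : num.toNat = 0
    · simp [h0]
    · have := Nat.log_lt_of_lt_pow h0 (show num.toNat < 10 ^ 10 by omega)
      omega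
  interval_cases hk : Nat.log 10 num.toNat <;>
  · simp only [calculate, calculate_alt, hlen]
    try norm_num at hlow hup
    simp [PySem.List.pyRange, List.range_succ]
    try split_ifs
    all_goals omega
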